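-- pv_equiv track=rewrite | github.com/almatzhezbayev/ubs_solutions | app/routes.py | inverse_double_consonants
-- ===== SOURCE A (Python) =====
-- def inverse_double_consonants(x: str) -> str:
--     """Remove doubled consonants"""
--     vowels = 'aeiouAEIOU'
--     result = []
--     i = 0
--     while i < len(x):
--         result.append(x[i])
--         if (i + 1 < len(x) and x[i] == x[i+1] and
--             x[i].isalpha() and x[i] not in vowels):
--             i += 1  # Skip the duplicate
--         i += 1
--     return ''.join(result)
-- ===== SOURCE B (Python) =====
-- def inverse_double_consonants(x: str) -> str:
--     """Remove doubled consonants: run-length scan instead of per-character skip."""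
--     vowels = 'aeiouAEIOU'
--     parts = []
--     i = 0
--     n = len(x)
--     while i < n:
--         ch = x[i]
--         j = i
--         while j < n and x[j] == ch:
--             j += 1
--         L = j - i
--         if ch.isalpha() and ch not in vowels:
--             parts.append(ch * (L - L // 2))
--         else:
--             parts.append(ch * L)
--         i = j
--     return ''.join(parts)
-- ===== Notes on version B (the rewrite author's own statement) =====
-- stated objective: alternative
-- what changed: Replaces A's per-character sliding loop that skips the second char of a doubled consonant by a run-length scan: split the string into maximal runs of equal characters and emit L - L//2 copies for a consonant run of length L, L copies otherwise.
import Mathlib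
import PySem

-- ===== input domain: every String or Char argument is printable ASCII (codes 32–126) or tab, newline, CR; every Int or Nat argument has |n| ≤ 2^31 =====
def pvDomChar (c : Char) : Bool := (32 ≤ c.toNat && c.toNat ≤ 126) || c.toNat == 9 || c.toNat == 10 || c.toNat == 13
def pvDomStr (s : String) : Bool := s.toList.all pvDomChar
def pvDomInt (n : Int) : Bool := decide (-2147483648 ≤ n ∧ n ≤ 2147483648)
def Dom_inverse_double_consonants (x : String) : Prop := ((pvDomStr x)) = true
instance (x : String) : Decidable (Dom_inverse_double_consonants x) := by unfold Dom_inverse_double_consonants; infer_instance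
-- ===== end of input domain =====

-- B replaces A's per-character sliding-skip loop by a run-length scan: each maximal run of a
-- consonant of length L contributes L - L/2 copies, any other run is kept whole (objective: alternative).

-- shared consonant test: c.isalpha() and c not in 'aeiouAEIOU'
def pvIsCons (c : Char) : Bool :=
  PySem.Chars.isalpha c && !("aeiouAEIOU".toList.contains c)

-- ===== PORT A =====
-- A's while loop: append x[i]; if the next char equals it and it is a consonant, skip the duplicate.
def pvLoopA : List Char → List Char
  | [] => []
  | [c] => [c]
  | c :: d :: rest =>
      if c == d && pvIsCons c then c :: pvLoopA rest
      else c :: pvLoopA (d :: rest)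

def inverse_double_consonants (x : String) : String :=
  String.ofList (pvLoopA x.toList)

-- ===== PORT B =====
-- Source B's outer loop: split off the maximal run of the head character, emit its contribution.
def pvRuns : List Char → List (Char × Nat)
  | [] => []
  | c :: rest =>
      (c, (rest.takeWhile (· == c)).length + 1) :: pvRuns (rest.dropWhile (· == c))
  termination_by cs => cs.length
  decreasing_by
    simpa using Nat.lt_succ_of_le (List.length_dropWhile_le (· == c) rest)

def pvEmit (p : Char × Nat) : List Char :=
  List.replicate (if pvIsCons p.1 then p.2 - p.2 / 2 else p.2) p.1

def inverse_double_consonants_alt (x : String) : String :=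
  String.ofList ((pvRuns x.toList).flatMap pvEmit)

-- ===== PRECONDITION & SPEC =====
def Spec_inverse_double_consonants (x : String) (out : String) : Prop := out = inverse_double_consonants_alt x
instance (x : String) (out : String) : Decidable (Spec_inverse_double_consonants x out) := by unfold Spec_inverse_double_consonants; infer_instance

-- ===== CLAIM (what is proved, stated in full; the proofs are below) =====
def Claim_equal_inverse_double_consonants : Prop := ∀ (x : String), Dom_inverse_double_consonants x → Spec_inverse_double_consonants x (inverse_double_consonants x)

-- ===== LEMMAS AND PROOFS =====

-- A's loop on a maximal run: replicate n c followed by a list not starting with c.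
lemma pvLoopA_replicate (c : Char) :
    ∀ n (rest : List Char), (∀ d, rest.head? = some d → d ≠ c) →
    pvLoopA (List.replicate n c ++ rest)
      = List.replicate (if pvIsCons c then n - n / 2 else n) c ++ pvLoopA rest := by
  intro n
  induction n using Nat.strong_induction_on with
  | _ n ih =>
    intro rest hrest
    match n with
    | 0 => simp
    | 1 =>
      cases rest with
      | nil => cases h : pvIsCons c <;> simp [pvLoopA]
      | cons d r =>
        have hd : d ≠ c := hrest d rfl
        have hbe : (c == d) = false := by
          exact beq_eq_false_iff_ne.mpr (fun h => hd h.symm)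
        cases h : pvIsCons c <;>
          simp [pvLoopA, hbe]
    | (m + 2) =>
      have heq : List.replicate (m + 2) c ++ rest
          = c :: c :: (List.replicate m c ++ rest) := by
        simp [List.replicate_succ]
      rw [heq]
      cases h : pvIsCons c with
      | true =>
        have := ih m (by omega) rest hrest
        rw [show pvLoopA (c :: c :: (List.replicate m c ++ rest))
              = c :: pvLoopA (List.replicate m c ++ rest) by
            simp [pvLoopA, h]]
        rw [this]
        rw [h]
        rw [show m + 2 - (m + 2) / 2 = (m - m / 2) + 1 by omega]
        simp [List.replicate_succ]
      | false =>
        have hstep : pvLoopA (c :: c :: (List.replicate m c ++ rest))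
            = c :: pvLoopA (List.replicate (m + 1) c ++ rest) := by
          simp [pvLoopA, h, List.replicate_succ]
        rw [hstep, ih (m + 1) (by omega) rest hrest]
        simp [h, List.replicate_succ]

-- the core equivalence, on char lists
lemma pvLoopA_eq_runs : ∀ cs : List Char, pvLoopA cs = (pvRuns cs).flatMap pvEmit := by
  have key : ∀ n (cs : List Char), cs.length ≤ n → pvLoopA cs = (pvRuns cs).flatMap pvEmit := by
    intro n
    induction n with
    | zero =>
      intro cs hcs
      have : cs = [] := List.eq_nil_of_length_eq_zero (Nat.le_zero.mp hcs)
      subst this; simp [pvLoopA, pvRuns]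
    | succ n ihn =>
      intro cs hcs
      match cs with
      | [] => simp [pvLoopA, pvRuns]
      | c :: rest =>
        have ih : pvLoopA (rest.dropWhile (· == c)) = (pvRuns (rest.dropWhile (· == c))).flatMap pvEmit := by
          apply ihn
          have := List.length_dropWhile_le (· == c) rest
          simp at hcs; omega
        have hsplit : c :: rest
        = List.replicate ((rest.takeWhile (· == c)).length + 1) c
            ++ rest.dropWhile (· == c) := by
          have htw : rest.takeWhile (· == c) = List.replicate ((rest.takeWhile (· == c)).length) c := by
            apply List.eq_replicate_of_mem
            intro d hd
            have := List.mem_takeWhile_imp hd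
            simpa [beq_iff_eq] using this
          calc c :: rest = c :: (rest.takeWhile (· == c) ++ rest.dropWhile (· == c)) := by
                  rw [List.takeWhile_append_dropWhile]
            _ = _ := by rw [List.replicate_succ]; rw [htw]; simp
        have hhead : ∀ d, (rest.dropWhile (· == c)).head? = some d → d ≠ c := by
          intro d hd
          have := List.head?_dropWhile_not (· == c) rest
          rw [hd] at this
          simpa [beq_iff_eq] using this
        conv_rhs => rw [pvRuns.eq_def]
        conv_lhs => rw [hsplit]
        rw [pvLoopA_replicate c _ _ hhead, ih]
        simp [pvEmit]
  intro cs
  exact key cs.length cs le_rfl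

-- ===== VERDICT (by name: the statement is the Claim_ definition above) =====
theorem inverse_double_consonants_spec : Claim_equal_inverse_double_consonants := by
  intro x _
  show _ = _
  unfold inverse_double_consonants inverse_double_consonants_alt
  rw [pvLoopA_eq_runs]
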